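-- pv_equiv track=rewrite | github.com/ayahyaaa/Kripto-Tucil1 | src.py | keymaker
-- ===== SOURCE A (Python) =====
-- def keymaker(message,key):
--     keychar = []
--     if (len(message)>(len(key))):
--         for i in range(len(message)):
--             keychar.insert(len(keychar),ord(key[i%len(key)])%97)
--     else:
--         for characters in key:
--             keychar.insert(len(keychar),ord(characters)%97)
--
--     return keychar
-- ===== SOURCE B (Python) =====
-- def keymaker(message, key):
--     base = [ord(c) % 97 for c in key]
--     n = len(message)
--     if n <= len(key):
--         return base
--     reps = -(-n // len(key))          # ceil(n / len(key))
--     return (base * reps)[:n]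
-- ===== Notes on version B (the rewrite author's own statement) =====
-- stated objective: alternative
-- what changed: Instead of A's per-index loop computing ord(key[i % len(key)]) % 97 at every position, B encodes the key once into a code list, tiles it by ceiling-division list replication (base * reps) and truncates with a slice [:n]; no per-position ord call or modular indexing remains.
import Mathlib
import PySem

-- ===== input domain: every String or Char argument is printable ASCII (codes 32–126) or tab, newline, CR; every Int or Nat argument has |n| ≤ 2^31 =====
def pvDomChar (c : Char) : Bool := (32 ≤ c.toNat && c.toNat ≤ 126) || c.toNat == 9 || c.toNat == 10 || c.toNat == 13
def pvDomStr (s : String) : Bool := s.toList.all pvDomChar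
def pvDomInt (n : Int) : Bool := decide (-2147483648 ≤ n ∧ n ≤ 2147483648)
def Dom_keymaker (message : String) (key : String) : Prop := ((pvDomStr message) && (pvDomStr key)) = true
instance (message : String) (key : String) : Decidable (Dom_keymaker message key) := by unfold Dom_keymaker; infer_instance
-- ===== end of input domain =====

-- B replaces A's per-index modular lookup loop by encoding the key once, tiling the code
-- list with ceiling-division replication and truncating with a slice (objective: alternative).

-- ===== PORT A =====
def keymaker (message : String) (key : String) : List Int :=
  let keychar : List Int := []
  if message.toList.length > key.toList.length then
    (PySem.List.pyRange 0 (message.toList.length : Int) 1).foldl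
      (fun acc i =>
        acc ++ [PySem.Int.mod
          ((PySem.List.pyGetD key.toList (PySem.Int.mod i (key.toList.length : Int)) ' ').toNat : Int) 97])
      keychar
  else
    key.toList.foldl
      (fun acc c => acc ++ [PySem.Int.mod ((c.toNat : Int)) 97]) keychar

-- ===== PORT B =====
def keymaker_alt (message : String) (key : String) : List Int :=
  let base : List Int := key.toList.map (fun c => PySem.Int.mod ((c.toNat : Int)) 97)
  let n : Int := (message.toList.length : Int)
  if n ≤ (key.toList.length : Int) then base
  else
    let reps : Int := -(PySem.Int.floordiv (-n) (key.toList.length : Int))  -- -(-n // len(key))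
    PySem.List.slice (PySem.List.pyRepeat base reps) none (some n)          -- (base * reps)[:n]

-- ===== PRECONDITION & SPEC =====
-- Pre_ excludes exactly the inputs where A raises ZeroDivisionError: empty key with non-empty message.
def Pre_keymaker (message : String) (key : String) : Prop :=
  key.toList = [] → message.toList = []
instance (message : String) (key : String) : Decidable (Pre_keymaker message key) := by
  unfold Pre_keymaker; infer_instance
def pvWitness_keymaker : String × String := ("hello", "ab")

def Spec_keymaker (message : String) (key : String) (out : List Int) : Prop := out = keymaker_alt message key
instance (message : String) (key : String) (out : List Int) : Decidable (Spec_keymaker message key out) := by unfold Spec_keymaker; infer_instance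

-- ===== CLAIM (what is proved, stated in full; the proofs are below) =====
def Claim_equal_keymaker : Prop := ∀ (message : String) (key : String), Dom_keymaker message key → Pre_keymaker message key → Spec_keymaker message key (keymaker message key)

-- ===== LEMMAS AND PROOFS =====

-- The tiled code list, position by position: element i of base*r is base[i % len(base)].
theorem tile_eq_map_range (base : List Int) (r : Nat) :
    (List.replicate r base).flatten
      = (List.range (r * base.length)).map (fun i => base.getD (i % base.length) 0) := by
  induction r with
  | zero => simp
  | succ r ih =>
    have hstep : (r + 1) * base.length = base.length + r * base.length := by ring
    rw [List.replicate_succ, List.flatten_cons, ih, hstep, List.range_add, List.map_append,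
      List.map_map]
    congr 1
    · -- map over range (len base) is base itself
      apply List.ext_getElem
      · simp
      · intro i h1 h2
        have hi : i < base.length := by simpa using h1
        simp [Nat.mod_eq_of_lt hi, List.getD, List.getElem?_eq_getElem hi]
    · -- shifting the index by len base does not change i % len base
      apply List.map_congr_left
      intro i _
      simp [Nat.add_mod_left]

theorem keymaker_eq (message key : String) (h : Pre_keymaker message key) :
    keymaker message key = keymaker_alt message key := by
  unfold keymaker keymaker_alt Pre_keymaker at *
  dsimp only at *
  set k : List Char := key.toList with hk
  set m : List Char := message.toList with hm
  by_cases hMK : m.length > k.length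
  · -- A's indexed branch vs B's tile-and-slice branch
    have hK : 0 < k.length := by
      rcases Nat.eq_zero_or_pos k.length with h0 | h0
      · have : m = [] := h (List.length_eq_zero_iff.mp h0)
        simp [this] at hMK
      · exact h0
    rw [if_pos hMK, if_neg (by exact_mod_cast not_le.mpr hMK)]
    set base : List Int := k.map (fun c => PySem.Int.mod ((c.toNat : Int)) 97) with hbase
    have hbl : base.length = k.length := by simp [hbase]
    set reps : Int := -(PySem.Int.floordiv (-(m.length : Int)) (k.length : Int)) with hreps
    have hceil : (reps - 1) * (k.length : Int) < (m.length : Int)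
        ∧ (m.length : Int) ≤ reps * (k.length : Int) :=
      (PySem.Int.neg_floordiv_neg_eq_iff_of_pos (by exact_mod_cast hK)).mp hreps.symm
    have hrpos : 0 < reps := by nlinarith [hceil.1, hceil.2, hMK]
    have hmle : m.length ≤ reps.toNat * k.length := by
      have : (m.length : Int) ≤ ((reps.toNat * k.length : Nat) : Int) := by
        push_cast; rw [Int.toNat_of_nonneg hrpos.le]; exact hceil.2
      exact_mod_cast this
    -- B side: slice is take, pyRepeat is flatten ∘ replicate, then the tile lemma
    rw [PySem.List.slice_to (PySem.List.pyRepeat base reps) (b := (m.length : Int)) (by omega),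
      PySem.List.pyRepeat, Int.toNat_natCast,
      tile_eq_map_range base reps.toNat, hbl, ← List.map_take, List.take_range,
      Nat.min_eq_left hmle]
    -- A side: fold-with-append is map over the range
    rw [PySem.List.foldl_append_singleton_eq_map, List.nil_append, PySem.List.pyRange_one]
    simp only [sub_zero, Int.toNat_natCast, List.map_map]
    apply List.map_congr_left
    intro i _
    have hmod : i % k.length < k.length := Nat.mod_lt _ hK
    simp only [Function.comp_apply, zero_add, PySem.Int.mod_natCast,
      PySem.List.pyGetD_natCast]
    rw [hbase]
    simp [List.getD, List.getElem?_eq_getElem hmod]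
  · -- both return the encoded key directly
    rw [if_neg hMK, if_pos (by exact_mod_cast not_lt.mp hMK),
      PySem.List.foldl_append_singleton_eq_map, List.nil_append]

-- ===== VERDICT (by name: the statement is the Claim_ definition above) =====
theorem keymaker_spec : Claim_equal_keymaker := by
  intro message key _ hpre
  exact keymaker_eq message key hpre
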